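-- pv_equiv track=rewrite | github.com/jguida941/voiceterm | dev/scripts/devctl/review_channel_handoff.py | _normalize_inline_markdown
-- ===== SOURCE A (Python) =====
-- def _normalize_inline_markdown(value: str) -> str:
--     normalized = value.strip()
--     wrappers = ("**", "__", "`")
--     changed = True
--     while normalized and changed:
--         changed = False
--         for wrapper in wrappers:
--             if normalized.startswith(wrapper) and normalized.endswith(wrapper):
--                 normalized = normalized[len(wrapper) : -len(wrapper)].strip()
--                 changed = True
--                 break
--     return normalized
-- ===== SOURCE B (Python) =====
-- def _normalize_inline_markdown(value: str) -> str:
--     stripped = value.strip()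
--     for wrapper in ("**", "__", "`"):
--         if stripped.startswith(wrapper) and stripped.endswith(wrapper):
--             return _normalize_inline_markdown(stripped[len(wrapper):-len(wrapper)])
--     return stripped
-- ===== Notes on version B (the rewrite author's own statement) =====
-- stated objective: simpler
-- what changed: Replaces the while-loop driven by a mutable boolean flag with an inner for/break by a direct recursive peeler: the first matching wrapper recurses on the slice, no loop state at all.
import Mathlib
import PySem

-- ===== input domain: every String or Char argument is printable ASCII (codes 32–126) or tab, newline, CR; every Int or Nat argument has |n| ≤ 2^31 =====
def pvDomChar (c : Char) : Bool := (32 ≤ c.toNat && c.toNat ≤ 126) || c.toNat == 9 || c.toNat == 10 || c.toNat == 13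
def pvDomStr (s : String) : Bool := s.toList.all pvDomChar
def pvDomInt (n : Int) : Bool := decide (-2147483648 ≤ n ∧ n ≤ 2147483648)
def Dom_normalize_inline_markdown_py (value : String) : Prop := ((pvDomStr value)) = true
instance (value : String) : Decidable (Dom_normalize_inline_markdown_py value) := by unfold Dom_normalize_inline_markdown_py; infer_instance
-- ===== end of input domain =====

-- B rewrites A's while-loop/'changed'-flag/for-break as a direct recursive peeler (simpler decomposition, same cost).

-- ===== PORT A =====

-- one pass of A's inner 'for wrapper in wrappers: … break': returns (new normalized, changed)
def pvStepA (s : List Char) : List Char × Bool :=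
  if PySem.Chars.startswith s ['*','*'] && PySem.Chars.endswith s ['*','*'] then
    (PySem.Chars.strip (PySem.List.slice s (some 2) (some (-2))), true)
  else if PySem.Chars.startswith s ['_','_'] && PySem.Chars.endswith s ['_','_'] then
    (PySem.Chars.strip (PySem.List.slice s (some 2) (some (-2))), true)
  else if PySem.Chars.startswith s ['`'] && PySem.Chars.endswith s ['`'] then
    (PySem.Chars.strip (PySem.List.slice s (some 1) (some (-1))), true)
  else (s, false)

-- startswith a nonempty wrapper forces the string nonempty (needed for termination)
theorem pv_startswith_ne_nil (s p : List Char) (hp : p ≠ [])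
    (h : PySem.Chars.startswith s p = true) : s ≠ [] := by
  rw [PySem.Chars.startswith_iff] at h
  intro hs; subst hs
  exact hp (List.prefix_nil.mp h)

theorem pv_strip_length_le (s : List Char) :
    (PySem.Chars.strip s).length ≤ s.length := by
  unfold PySem.Chars.strip PySem.Chars.rstrip PySem.Chars.lstrip
  calc ((List.dropWhile PySem.Chars.isspace (List.dropWhile PySem.Chars.isspace s).reverse).reverse).length
      = (List.dropWhile PySem.Chars.isspace (List.dropWhile PySem.Chars.isspace s).reverse).length := List.length_reverse
    _ ≤ (List.dropWhile PySem.Chars.isspace s).reverse.length := (List.dropWhile_sublist _).length_le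
    _ = (List.dropWhile PySem.Chars.isspace s).length := List.length_reverse
    _ ≤ s.length := (List.dropWhile_sublist _).length_le

theorem pv_slice_lt (s : List Char) (k : Int) (hk : 0 < k) (hs : s ≠ []) :
    (PySem.List.slice s (some k) (some (-k))).length < s.length := by
    rw [PySem.List.length_slice]
    have hle := PySem.List.clampIdx_le s.length (-k)
    have hge : 1 ≤ PySem.List.clampIdx s.length k := by
      unfold PySem.List.clampIdx
      have : 0 < s.length := List.length_pos_iff.mpr hs
      split_ifs <;> omega
    have : 0 < s.length := List.length_pos_iff.mpr hs
    omega

theorem pvStepA_shrink (s : List Char) (hs : s ≠ []) (h : (pvStepA s).2 = true) :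
    (pvStepA s).1.length < s.length := by
  unfold pvStepA at h ⊢
  split_ifs at h ⊢ with h1 h2 h3
  · exact lt_of_le_of_lt (pv_strip_length_le _) (pv_slice_lt s 2 (by norm_num) hs)
  · exact lt_of_le_of_lt (pv_strip_length_le _) (pv_slice_lt s 2 (by norm_num) hs)
  · exact lt_of_le_of_lt (pv_strip_length_le _) (pv_slice_lt s 1 (by norm_num) hs)

-- A's 'while normalized and changed' loop (changed starts True)
def pvLoopA (s : List Char) : List Char :=
  if hs : s = [] then s
  else
    if h : (pvStepA s).2 = true then pvLoopA (pvStepA s).1 else s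
termination_by s.length
decreasing_by exact pvStepA_shrink s hs h

def normalize_inline_markdown_py (value : String) : String :=
  String.ofList (pvLoopA (PySem.Chars.strip value.toList))

-- ===== PORT B =====

-- B (Source B): strip, then the first wrapper that matches both ends recurses on the slice
def pvPeelB (s : List Char) : List Char :=
  let n := PySem.Chars.strip s
  if h1 : PySem.Chars.startswith n ['*','*'] && PySem.Chars.endswith n ['*','*'] then
    pvPeelB (PySem.List.slice n (some 2) (some (-2)))
  else if h2 : PySem.Chars.startswith n ['_','_'] && PySem.Chars.endswith n ['_','_'] then
    pvPeelB (PySem.List.slice n (some 2) (some (-2)))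
  else if h3 : PySem.Chars.startswith n ['`'] && PySem.Chars.endswith n ['`'] then
    pvPeelB (PySem.List.slice n (some 1) (some (-1)))
  else n
termination_by s.length
decreasing_by
  · have hn : PySem.Chars.strip s ≠ [] := pv_startswith_ne_nil _ ['*','*'] (by simp)
      (by simp only [Bool.and_eq_true] at h1; exact h1.1)
    exact lt_of_lt_of_le (pv_slice_lt _ 2 (by norm_num) hn) (pv_strip_length_le s)
  · have hn : PySem.Chars.strip s ≠ [] := pv_startswith_ne_nil _ ['_','_'] (by simp)
      (by simp only [Bool.and_eq_true] at h2; exact h2.1)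
    exact lt_of_lt_of_le (pv_slice_lt _ 2 (by norm_num) hn) (pv_strip_length_le s)
  · have hn : PySem.Chars.strip s ≠ [] := pv_startswith_ne_nil _ ['`'] (by simp)
      (by simp only [Bool.and_eq_true] at h3; exact h3.1)
    exact lt_of_lt_of_le (pv_slice_lt _ 1 (by norm_num) hn) (pv_strip_length_le s)

def normalize_inline_markdown_py_alt (value : String) : String :=
  String.ofList (pvPeelB value.toList)

-- ===== PRECONDITION & SPEC =====
def Spec_normalize_inline_markdown_py (value : String) (out : String) : Prop := out = normalize_inline_markdown_py_alt value
instance (value : String) (out : String) : Decidable (Spec_normalize_inline_markdown_py value out) := by unfold Spec_normalize_inline_markdown_py; infer_instance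

-- ===== CLAIM (what is proved, stated in full; the proofs are below) =====
def Claim_equal_normalize_inline_markdown_py : Prop := ∀ (value : String), Dom_normalize_inline_markdown_py value → Spec_normalize_inline_markdown_py value (normalize_inline_markdown_py value)

-- ===== LEMMAS AND PROOFS =====

theorem pvLoopA_eq_pvPeelB (s : List Char) : pvLoopA (PySem.Chars.strip s) = pvPeelB s := by
  induction s using pvPeelB.induct with
  | case1 s n h1 ih =>
    have hn : PySem.Chars.strip s ≠ [] := pv_startswith_ne_nil _ ['*','*'] (by simp)
      (by simp only [Bool.and_eq_true] at h1; exact h1.1)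
    have hstep : pvStepA (PySem.Chars.strip s) = (PySem.Chars.strip (PySem.List.slice (PySem.Chars.strip s) (some 2) (some (-2))), true) := by
      unfold pvStepA; rw [if_pos h1]
    rw [pvPeelB, dif_pos h1, pvLoopA, dif_neg hn, hstep]
    simpa using ih
  | case2 s n h1 h2 ih =>
    have hn : PySem.Chars.strip s ≠ [] := pv_startswith_ne_nil _ ['_','_'] (by simp)
      (by simp only [Bool.and_eq_true] at h2; exact h2.1)
    have hstep : pvStepA (PySem.Chars.strip s) = (PySem.Chars.strip (PySem.List.slice (PySem.Chars.strip s) (some 2) (some (-2))), true) := by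
      unfold pvStepA; rw [if_neg h1, if_pos h2]
    rw [pvPeelB, dif_neg h1, dif_pos h2, pvLoopA, dif_neg hn, hstep]
    simpa using ih
  | case3 s n h1 h2 h3 ih =>
    have hn : PySem.Chars.strip s ≠ [] := pv_startswith_ne_nil _ ['`'] (by simp)
      (by simp only [Bool.and_eq_true] at h3; exact h3.1)
    have hstep : pvStepA (PySem.Chars.strip s) = (PySem.Chars.strip (PySem.List.slice (PySem.Chars.strip s) (some 1) (some (-1))), true) := by
      unfold pvStepA; rw [if_neg h1, if_neg h2, if_pos h3]
    rw [pvPeelB, dif_neg h1, dif_neg h2, dif_pos h3, pvLoopA, dif_neg hn, hstep]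
    simpa using ih
  | case4 s n h1 h2 h3 =>
    have hstep : pvStepA (PySem.Chars.strip s) = (PySem.Chars.strip s, false) := by
      unfold pvStepA; rw [if_neg h1, if_neg h2, if_neg h3]
    rw [pvPeelB, dif_neg h1, dif_neg h2, dif_neg h3, pvLoopA]
    by_cases hn : PySem.Chars.strip s = []
    · rw [dif_pos hn]
    · rw [dif_neg hn, dif_neg (by simp [hstep])]

-- ===== VERDICT (by name: the statement is the Claim_ definition above) =====
theorem normalize_inline_markdown_py_spec : Claim_equal_normalize_inline_markdown_py := by
  intro value _
  unfold Spec_normalize_inline_markdown_py normalize_inline_markdown_py normalize_inline_markdown_py_alt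
  rw [pvLoopA_eq_pvPeelB]
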